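-- pv_equiv track=rewrite | github.com/primordial-creations/asguardian | Asgard/Heimdall/Quality/services/_env_fallback_helpers.py | is_credential_like_value
-- ===== SOURCE A (Python) =====
-- from typing import Optional
--
-- CREDENTIAL_PLACEHOLDER_FRAGMENTS = frozenset({
--     "${", "{{", "<", "changeme", "todo", "replace", "your-", "your_",
--     "example", "placeholder", "xxxxx",
-- })
--
-- def is_credential_like_value(value_repr: Optional[str]) -> bool:
--     """
--     Return True if the default value looks like a real credential
--     (not a placeholder or empty value).
--     """
--     if not value_repr:
--         return False
--     value = value_repr.strip("'\"")
--     if not value: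
--         return False
--     value_lower = value.lower()
--     for fragment in CREDENTIAL_PLACEHOLDER_FRAGMENTS:
--         if fragment in value_lower:
--             return False
--     return True
-- ===== SOURCE B (Python) =====
-- from typing import Optional
--
-- _FRAGMENTS = ("${", "{{", "<", "changeme", "todo", "replace", "your-", "your_",
--               "example", "placeholder", "xxxxx")
--
-- def is_credential_like_value(value_repr: Optional[str]) -> bool:
--     if not value_repr:
--         return False
--     value = value_repr.strip("'\"")
--     if not value:
--         return False
--     value_lower = value.lower()
--     # single left-to-right sweep: at each position test whether any fragment starts there
--     for i in range(len(value_lower)):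
--         for frag in _FRAGMENTS:
--             if value_lower.startswith(frag, i):
--                 return False
--     return True
-- ===== Notes on version B (the rewrite author's own statement) =====
-- stated objective: alternative
-- what changed: Replaces A's fragment-major loop (one independent full substring scan per placeholder fragment) with a single left-to-right sweep over the lowered string that tests at each position whether any fragment starts there; the identical falsy/strip/lower prelude is kept.
import Mathlib
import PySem

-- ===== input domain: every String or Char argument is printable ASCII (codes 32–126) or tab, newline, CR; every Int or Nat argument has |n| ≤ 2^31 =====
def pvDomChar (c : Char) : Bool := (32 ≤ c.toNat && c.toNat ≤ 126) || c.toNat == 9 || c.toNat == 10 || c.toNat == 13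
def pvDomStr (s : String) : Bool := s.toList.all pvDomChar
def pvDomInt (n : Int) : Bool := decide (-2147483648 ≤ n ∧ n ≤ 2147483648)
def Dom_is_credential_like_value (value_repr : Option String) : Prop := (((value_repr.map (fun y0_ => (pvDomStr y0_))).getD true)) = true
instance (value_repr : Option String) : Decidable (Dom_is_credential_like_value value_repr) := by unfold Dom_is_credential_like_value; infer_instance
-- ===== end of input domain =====

-- B replaces A's fragment-major loop (one full substring scan per placeholder fragment)
-- by a single left-to-right sweep over the string testing at each position whether some
-- fragment starts there (objective: alternative; same prelude, same result).

-- ===== PORT A =====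
-- CREDENTIAL_PLACEHOLDER_FRAGMENTS, as List Char values (frozenset iteration order is
-- unspecified in Python; A's result does not depend on it, any fixed order is faithful).
def pvFragments : List (List Char) :=
  ["${".toList, "{{".toList, "<".toList, "changeme".toList, "todo".toList,
   "replace".toList, "your-".toList, "your_".toList, "example".toList,
   "placeholder".toList, "xxxxx".toList]

def is_credential_like_value (value_repr : Option String) : Bool :=
  match value_repr with
  | none => false                                   -- `if not value_repr` (None is falsy)
  | some s =>
    if s.toList = [] then false                     -- `if not value_repr` ("" is falsy)
    else
      let value := PySem.Chars.stripChars s.toList ['\'', '"']   -- value_repr.strip("'\"")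
      if value = [] then false                      -- `if not value`
      else
        let value_lower := PySem.Chars.lower value
        -- for fragment in CREDENTIAL_PLACEHOLDER_FRAGMENTS: if fragment in value_lower: return False
        if pvFragments.any (fun frag => PySem.Chars.isIn frag value_lower) then false
        else true

-- ===== PORT B =====
-- `for i in range(len(value_lower)): if any fragment starts at i: return False` —
-- recursion over the successive suffixes value_lower[i:], one step per position i,
-- testing `value_lower.startswith(frag, i)` = frag is a prefix of that suffix.
def pvScan : List Char → Bool
  | [] => true
  | c :: t =>
    if pvFragments.any (fun frag => PySem.Chars.startswith (c :: t) frag) then false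
    else pvScan t

def is_credential_like_value_alt (value_repr : Option String) : Bool :=
  match value_repr with
  | none => false
  | some s =>
    if s.toList = [] then false
    else
      let value := PySem.Chars.stripChars s.toList ['\'', '"']
      if value = [] then false
      else pvScan (PySem.Chars.lower value)

-- ===== PRECONDITION & SPEC =====
def Spec_is_credential_like_value (value_repr : Option String) (out : Bool) : Prop := out = is_credential_like_value_alt value_repr
instance (value_repr : Option String) (out : Bool) : Decidable (Spec_is_credential_like_value value_repr out) := by unfold Spec_is_credential_like_value; infer_instance

-- ===== CLAIM (what is proved, stated in full; the proofs are below) =====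
def Claim_equal_is_credential_like_value : Prop := ∀ (value_repr : Option String), Dom_is_credential_like_value value_repr → Spec_is_credential_like_value value_repr (is_credential_like_value value_repr)

-- ===== LEMMAS AND PROOFS =====

-- The single sweep finds a fragment somewhere iff some fragment is an infix.
theorem pvScan_eq_any (l : List Char) :
    pvScan l = (if pvFragments.any (fun frag => PySem.Chars.isIn frag l) then false else true) := by
  induction l with
  | nil => decide
  | cons c t ih =>
    simp only [pvScan]
    by_cases hsw : (pvFragments.any (fun frag => PySem.Chars.startswith (c :: t) frag)) = true
    · obtain ⟨f, hf, hp⟩ := List.any_eq_true.mp hsw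
      have : (pvFragments.any (fun frag => PySem.Chars.isIn frag (c :: t))) = true :=
        List.any_eq_true.mpr ⟨f, hf,
          (PySem.Chars.isIn_iff_infix f (c :: t)).mpr
            (List.infix_cons_iff.mpr (Or.inl ((PySem.Chars.startswith_iff (c :: t) f).mp hp)))⟩
      rw [if_pos hsw, if_pos this]
    · have hsame : (pvFragments.any (fun frag => PySem.Chars.isIn frag (c :: t)))
          = (pvFragments.any (fun frag => PySem.Chars.isIn frag t)) := by
        rw [Bool.eq_iff_iff]
        constructor
        · intro h
          obtain ⟨f, hf, hi⟩ := List.any_eq_true.mp h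
          rcases List.infix_cons_iff.mp ((PySem.Chars.isIn_iff_infix f (c :: t)).mp hi) with hpre | hinf
          · exact absurd (List.any_eq_true.mpr ⟨f, hf,
              (PySem.Chars.startswith_iff (c :: t) f).mpr hpre⟩) hsw
          · exact List.any_eq_true.mpr ⟨f, hf, (PySem.Chars.isIn_iff_infix f t).mpr hinf⟩
        · intro h
          obtain ⟨f, hf, hi⟩ := List.any_eq_true.mp h
          exact List.any_eq_true.mpr ⟨f, hf, (PySem.Chars.isIn_iff_infix f (c :: t)).mpr
            (List.infix_cons_iff.mpr (Or.inr ((PySem.Chars.isIn_iff_infix f t).mp hi)))⟩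
      rw [if_neg hsw, ih, hsame]

-- ===== VERDICT (by name: the statement is the Claim_ definition above) =====
theorem is_credential_like_value_spec : Claim_equal_is_credential_like_value := by
  intro value_repr _
  unfold Spec_is_credential_like_value
  cases value_repr with
  | none => rfl
  | some s =>
    simp only [is_credential_like_value, is_credential_like_value_alt, pvScan_eq_any]
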